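-- pv_equiv track=rewrite | github.com/NewThinker-Jeffrey/sk4slam | sk4slam/src/sk4slam_liegroups/bch_helper/bch_helper.py | get_all_possible_adxy_order_seqs
-- ===== SOURCE A (Python) =====
-- def split_order(ad_order, n):
--
--   def helper(remaining, parts, current):
--     if parts == 1:
--       if remaining > 0:
--         splits.append(tuple(current + [remaining]))
--       return
--
--     for i in range(1, remaining - parts + 2):
--       helper(remaining - i, parts - 1, current + [i])
--
--   splits = []
--   if n > 0 and ad_order >= n:
--     helper(ad_order, n, [])
--   return splits
--
-- def get_all_possible_adxy_order_seqs(ad_order, merge_equivalence=True):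
--   adxy_order_seqs = []
--   for k in range(1, ad_order + 1):
--     for split in split_order(ad_order, k):
--       if (k % 2) == 0:
--         adxy_order_seq = [(split[2 * i], split[2 * i + 1])
--                           for i in range(k // 2)]
--       else:
--         tmp = tuple([0] + list(split))
--         adxy_order_seq = [(tmp[2 * i], tmp[2 * i + 1])
--                           for i in range(len(tmp) // 2)]
--
--       if merge_equivalence:
--         # Check the Jacobi equivalence.
--         #
--         # The Jacobi Identitiy:
--         #   [X,[Y,Z]] - [Y,[X,Z]] - [[X,Y], Z] = 0
--         # Let Z = [Y,X], then [[X,Y], Z] = 0 and: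
--         #   [X,[Y,  Z  ]] = [Y,[X,  Z  ]]
--         #   [X,[Y,[Y,X]]] = [Y,[X,[Y,X]]]
--         # (adX * adY^2).X = (adY * adX * adY).X
--         #
--         # So the pattern
--         #     (... * adY^{k} * adX * adY)     --- patern 1
--         # is equivalent to
--         #     (... * adY^{k-1} * adX * adY^2) --- patern 2
--         # when they action on X. We'll regard them as the same
--         # and only keep patern 1.
--
--         # if adxy_order_seq[-1][0] == 1 and adxy_order_seq[-1][1] == 2:
--         #   continue
--         if adxy_order_seq[-1][0] >= 1 and adxy_order_seq[-1][1] == 2: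
--           continue
--
--       adxy_order_seqs.append(adxy_order_seq)
--   return adxy_order_seqs
-- ===== SOURCE B (Python) =====
-- def _combos(lo, hi, m):
--   # all strictly increasing m-tuples of cut points drawn from range(lo, hi), lex order
--   if m == 0:
--     return [[]]
--   return [[c] + rest for c in range(lo, hi) for rest in _combos(c + 1, hi, m - 1)]
--
--
-- def get_all_possible_adxy_order_seqs(ad_order, merge_equivalence=True):
--   seqs = []
--   for k in range(1, ad_order + 1):
--     # stars and bars: a composition of ad_order into k positive parts is the
--     # list of consecutive differences of 0 < c_1 < ... < c_{k-1} < ad_order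
--     for cuts in _combos(1, ad_order, k - 1):
--       bounds = [0] + cuts + [ad_order]
--       parts = [b - a for a, b in zip(bounds, bounds[1:])]
--       if k % 2 == 1:
--         parts = [0] + parts
--       seq = list(zip(parts[0::2], parts[1::2]))
--       if merge_equivalence and seq[-1][0] >= 1 and seq[-1][1] == 2:
--         continue
--       seqs.append(seq)
--   return seqs
-- ===== Notes on version B (the rewrite author's own statement) =====
-- stated objective: alternative
-- what changed: The recursive remaining/parts splitting with a shared accumulator list is replaced by a stars-and-bars enumeration: k-1 increasing cut points are enumerated combinatorially and turned into a composition by consecutive differences, and the pairing is done by zipping the even- and odd-position slices instead of index arithmetic over range(k//2).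
import Mathlib
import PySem

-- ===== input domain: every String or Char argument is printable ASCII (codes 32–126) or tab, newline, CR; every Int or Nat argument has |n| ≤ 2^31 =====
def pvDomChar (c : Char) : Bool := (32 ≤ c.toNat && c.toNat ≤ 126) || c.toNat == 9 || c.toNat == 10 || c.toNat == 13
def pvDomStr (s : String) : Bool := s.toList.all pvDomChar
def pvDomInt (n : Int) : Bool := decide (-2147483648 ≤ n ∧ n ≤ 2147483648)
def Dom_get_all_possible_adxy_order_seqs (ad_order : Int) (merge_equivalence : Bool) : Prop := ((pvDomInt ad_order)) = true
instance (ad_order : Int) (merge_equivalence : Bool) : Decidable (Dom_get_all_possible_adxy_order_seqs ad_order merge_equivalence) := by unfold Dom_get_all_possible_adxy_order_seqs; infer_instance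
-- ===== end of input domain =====

-- B replaces the recursive remaining/parts splitting by a stars-and-bars enumeration of cut
-- points (compositions as consecutive differences) and pairs by zipping even/odd slices
-- (objective: alternative).


-- ===== PORT A =====
-- `helper` of split_order.  Python only ever calls it with parts ≥ 1 (split_order guards
-- n > 0), so the recursion is carried on parts as a Nat; the 0 case is never reached.
def pySplitHelper (remaining : Int) (parts : Nat) (current : List Int) : List (List Int) :=
  match parts with
  | 0 => []
  | 1 => if remaining > 0 then [current ++ [remaining]] else []
  | p + 2 =>
      -- for i in range(1, remaining - parts + 2): helper(remaining - i, parts - 1, current + [i])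
      (PySem.List.pyRange 1 (remaining - ((p : Int) + 2) + 2) 1).foldl
        (fun splits i => splits ++ pySplitHelper (remaining - i) (p + 1) (current ++ [i])) []

def split_order (ad_order : Int) (n : Int) : List (List Int) :=
  if n > 0 ∧ ad_order ≥ n then pySplitHelper ad_order n.toNat [] else []

def get_all_possible_adxy_order_seqs (ad_order : Int) (merge_equivalence : Bool) :
    List (List (Int × Int)) :=
  (PySem.List.pyRange 1 (ad_order + 1) 1).foldl (fun seqs k =>
    (split_order ad_order k).foldl (fun seqs split =>
      let seq : List (Int × Int) :=
        if PySem.Int.mod k 2 = 0 then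
          -- indices 2*i, 2*i+1 are always in range here (split has k elements)
          (PySem.List.pyRange 0 (PySem.Int.floordiv k 2) 1).map (fun i =>
            (PySem.List.pyGetD split (2 * i) 0, PySem.List.pyGetD split (2 * i + 1) 0))
        else
          let tmp : List Int := 0 :: split
          (PySem.List.pyRange 0 (PySem.Int.floordiv (tmp.length : Int) 2) 1).map (fun i =>
            (PySem.List.pyGetD tmp (2 * i) 0, PySem.List.pyGetD tmp (2 * i + 1) 0))
      if merge_equivalence then
        match PySem.List.pyGet? seq (-1) with
        | some pr => if pr.1 ≥ 1 ∧ pr.2 = 2 then seqs else seqs ++ [seq]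
        | none => seqs   -- IndexError in Python; unreachable: seq is nonempty for every k ≥ 1
      else seqs ++ [seq]) seqs) []

-- ===== PORT B =====
-- _combos(lo, hi, m): increasing m-tuples of cut points from range(lo, hi), lex order.
-- m is the Python int k - 1, always ≥ 0, carried as a Nat.
def pyCombos (lo : Int) (hi : Int) (m : Nat) : List (List Int) :=
  match m with
  | 0 => [[]]
  | m + 1 =>
      (PySem.List.pyRange lo hi 1).flatMap (fun c =>
        (pyCombos (c + 1) hi m).map (fun rest => c :: rest))

-- hand port of the step-2 slices xs[0::2] (and, applied to tail, xs[1::2]): exact — the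
-- elements at even positions of xs, in order.
def everyOther : List Int → List Int
  | [] => []
  | [a] => [a]
  | a :: _ :: t => a :: everyOther t

def get_all_possible_adxy_order_seqs_alt (ad_order : Int) (merge_equivalence : Bool) :
    List (List (Int × Int)) :=
  (PySem.List.pyRange 1 (ad_order + 1) 1).foldl (fun seqs k =>
    (pyCombos 1 ad_order (k - 1).toNat).foldl (fun seqs cuts =>
      let bounds : List Int := 0 :: (cuts ++ [ad_order])
      let parts : List Int := List.zipWith (fun a b => b - a) bounds bounds.tail
      let parts2 : List Int := if PySem.Int.mod k 2 = 1 then 0 :: parts else parts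
      let seq : List (Int × Int) := List.zip (everyOther parts2) (everyOther parts2.tail)
      if merge_equivalence then
        match seq.getLast? with
        | some pr => if pr.1 ≥ 1 ∧ pr.2 = 2 then seqs else seqs ++ [seq]
        | none => seqs ++ [seq]   -- IndexError in Python; unreachable: seq is nonempty
      else seqs ++ [seq]) seqs) []

-- ===== PRECONDITION & SPEC =====
def Spec_get_all_possible_adxy_order_seqs (ad_order : Int) (merge_equivalence : Bool) (out : List (List (Int × Int))) : Prop := out = get_all_possible_adxy_order_seqs_alt ad_order merge_equivalence
instance (ad_order : Int) (merge_equivalence : Bool) (out : List (List (Int × Int))) : Decidable (Spec_get_all_possible_adxy_order_seqs ad_order merge_equivalence out) := by unfold Spec_get_all_possible_adxy_order_seqs; infer_instance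

-- ===== CLAIM (what is proved, stated in full; the proofs are below) =====
def Claim_equal_get_all_possible_adxy_order_seqs : Prop := ∀ (ad_order : Int) (merge_equivalence : Bool), Dom_get_all_possible_adxy_order_seqs ad_order merge_equivalence → Spec_get_all_possible_adxy_order_seqs ad_order merge_equivalence (get_all_possible_adxy_order_seqs ad_order merge_equivalence)

-- ===== LEMMAS AND PROOFS =====

-- parts of the composition determined by cut points, as consecutive differences from prev to n
def partsOf (n : Int) : Int → List Int → List Int
  | prev, [] => [n - prev]
  | prev, c :: cs => (c - prev) :: partsOf n c cs

theorem splitHelper_two (r : Int) (p : Nat) (c : List Int) :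
    pySplitHelper r (p + 2) c =
      (PySem.List.pyRange 1 (r - ((p : Int) + 2) + 2) 1).flatMap
        (fun i => pySplitHelper (r - i) (p + 1) (c ++ [i])) := by
  rw [pySplitHelper, PySem.List.foldl_append_eq_flatMap]
  simp

theorem splitHelper_acc (p : Nat) : ∀ (r : Int) (c : List Int),
    pySplitHelper r p c = (pySplitHelper r p []).map (fun s => c ++ s) := by
  induction p using Nat.strong_induction_on with
  | _ p ih =>
    match p with
    | 0 => intro r c; simp [pySplitHelper]
    | 1 => intro r c; simp only [pySplitHelper]; split <;> simp
    | p + 2 =>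
      intro r c
      rw [splitHelper_two, splitHelper_two]
      rw [List.map_flatMap]
      refine List.flatMap_congr (fun i _ => ?_)
      rw [ih (p + 1) (by omega) (r - i) (c ++ [i]), ih (p + 1) (by omega) (r - i) ([] ++ [i])]
      simp [List.map_map, Function.comp_def]

theorem splitHelper_nil (p : Nat) (r : Int) (c : List Int) (h : r < (p : Int)) :
    pySplitHelper r p c = [] := by
  match p with
  | 0 => simp [pySplitHelper]
  | 1 =>
    simp only [pySplitHelper]
    rw [if_neg]; omega
  | p + 2 =>
    rw [splitHelper_two, PySem.List.pyRange_one_eq_nil (by push_cast at h ⊢; omega)]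
    simp

-- truncate a range-flatMap whose tail terms are all nil
theorem flatMap_range_truncate {α : Type} (N1 N2 : Nat) (G : Nat → List α) (hle : N2 ≤ N1)
    (hnil : ∀ j, N2 ≤ j → j < N1 → G j = []) :
    (List.range N1).flatMap G = (List.range N2).flatMap G := by
  obtain ⟨d, rfl⟩ := Nat.exists_eq_add_of_le hle
  rw [List.range_add, List.flatMap_append]
  have : ((List.range d).map (fun j => N2 + j)).flatMap G = [] := by
    simp only [List.flatMap_eq_nil_iff, List.mem_map, List.mem_range]
    rintro _ ⟨j, hj, rfl⟩
    exact hnil _ (by omega) (by omega)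
  rw [List.flatMap_map] at this ⊢
  simp [this]

theorem combos_main (n : Int) (m : Nat) : ∀ (prev : Int), prev < n →
    (pyCombos (prev + 1) n m).map (partsOf n prev) = pySplitHelper (n - prev) (m + 1) [] := by
  induction m with
  | zero =>
    intro prev h
    simp [pyCombos, partsOf, pySplitHelper]
    omega
  | succ m ih =>
    intro prev h
    rw [show m + 1 + 1 = m + 2 from rfl, splitHelper_two]
    -- both sides as flatMaps over List.range
    rw [pyCombos, List.map_flatMap, PySem.List.pyRange_one, PySem.List.pyRange_one,
        List.flatMap_map, List.flatMap_map]
    rw [flatMap_range_truncate (n - (prev + 1)).toNat (n - prev - ((m : Int) + 2) + 2 - 1).toNat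
      _ (by omega) ?nil]
    case nil =>
      intro j hj hjlt
      have hjle : n - prev - ((m : Int) + 2) + 2 - 1 ≤ (j : Int) := by omega
      have hjup : (j : Int) < n - (prev + 1) := by omega
      rw [show ((pyCombos (prev + 1 + (j : Int) + 1) n m).map
            (fun rest => (prev + 1 + (j : Int)) :: rest)).map (partsOf n prev)
          = ((pyCombos ((prev + 1 + (j : Int)) + 1) n m).map
              (partsOf n (prev + 1 + (j : Int)))).map
                (fun s => ((prev + 1 + (j : Int)) - prev) :: s) by
            simp [List.map_map, Function.comp_def, partsOf]]
      rw [ih (prev + 1 + (j : Int)) (by omega), splitHelper_nil _ _ _ (by push_cast; omega)]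
      simp
    refine List.flatMap_congr (fun j hj => ?_)
    have hjlt : (j : Int) < n - prev - ((m : Int) + 2) + 2 - 1 := by
      rw [List.mem_range] at hj; omega
    rw [show ((pyCombos (prev + 1 + (j : Int) + 1) n m).map
          (fun rest => (prev + 1 + (j : Int)) :: rest)).map (partsOf n prev)
        = ((pyCombos ((prev + 1 + (j : Int)) + 1) n m).map
            (partsOf n (prev + 1 + (j : Int)))).map
              (fun s => ((prev + 1 + (j : Int)) - prev) :: s) by
          simp [List.map_map, Function.comp_def, partsOf]]
    rw [ih (prev + 1 + (j : Int)) (by omega)]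
    rw [List.nil_append, splitHelper_acc (m + 1) (n - prev - (1 + (j : Int))) [1 + (j : Int)]]
    have h1 : n - (prev + 1 + (j : Int)) = n - prev - (1 + (j : Int)) := by ring
    have h2 : prev + 1 + (j : Int) - prev = 1 + (j : Int) := by ring
    rw [h1, h2]
    rfl

theorem zipWith_diff (n : Int) : ∀ (cuts : List Int) (prev : Int),
    List.zipWith (fun a b => b - a) (prev :: (cuts ++ [n])) (cuts ++ [n]) = partsOf n prev cuts := by
  intro cuts
  induction cuts with
  | nil => intro prev; simp [partsOf]
  | cons c cs ih => intro prev; simp only [List.cons_append, List.zipWith_cons_cons, partsOf, ih]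

theorem combos_length (n : Int) (m : Nat) : ∀ (lo : Int) (cs : List Int),
    cs ∈ pyCombos lo n m → cs.length = m := by
  induction m with
  | zero => intro lo cs h; simp [pyCombos] at h; simp [h]
  | succ m ih =>
    intro lo cs h
    simp only [pyCombos, List.mem_flatMap, List.mem_map] at h
    obtain ⟨c, _, rest, hrest, rfl⟩ := h
    simp [ih _ _ hrest]

theorem partsOf_length (n : Int) : ∀ (cuts : List Int) (prev : Int),
    (partsOf n prev cuts).length = cuts.length + 1 := by
  intro cuts
  induction cuts with
  | nil => intro prev; simp [partsOf]
  | cons c cs ih => intro prev; simp [partsOf, ih]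

-- the index-pairing comprehension equals zipping the even/odd-position sublists
theorem pairing_eq (m : Nat) : ∀ (l : List Int), l.length = 2 * m →
    (List.range m).map (fun i => (l.getD (2 * i) 0, l.getD (2 * i + 1) 0)) =
      List.zip (everyOther l) (everyOther l.tail) := by
  induction m with
  | zero => intro l h; rw [List.length_eq_zero_iff.mp h]; simp [everyOther]
  | succ m ih =>
    intro l h
    match l, h with
    | a :: b :: t, h =>
      rw [List.range_succ_eq_map, List.map_cons, List.map_map]
      have ht : t.length = 2 * m := by simp at h; omega
      have := ih t ht
      simp only [Function.comp_def]
      have hstep : (List.range m).map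
          (fun i => ((a :: b :: t).getD (2 * (i + 1)) 0, (a :: b :: t).getD (2 * (i + 1) + 1) 0))
          = (List.range m).map (fun i => (t.getD (2 * i) 0, t.getD (2 * i + 1) 0)) := by
        refine List.map_congr_left (fun i _ => ?_)
        have e1 : 2 * (i + 1) = 2 * i + 1 + 1 := by omega
        have e2 : 2 * (i + 1) + 1 = (2 * i + 1) + 1 + 1 := by omega
        rw [e2, e1]
        simp
      rw [hstep, this]
      show ((a :: b :: t).getD 0 0, (b :: t).getD 0 0) :: _ = _
      have e3 : everyOther (a :: b :: t) = a :: everyOther t := rfl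
      have e4 : (a :: b :: t).tail = b :: t := rfl
      have e5 : everyOther (b :: t) = b :: everyOther t.tail := by
        match t with
        | [] => rfl
        | x :: t' => rfl
      rw [e4, e3, e5]
      simp

theorem pyGet_neg_one_eq_getLast? {α : Type} (xs : List α) (h : xs ≠ []) :
    PySem.List.pyGet? xs (-1) = xs.getLast? := by
  rcases List.eq_nil_or_concat xs with rfl | ⟨ys, y, rfl⟩
  · exact absurd rfl h
  · rw [PySem.List.pyGet?_neg_one]

-- the heart of the equivalence: for 1 ≤ k ≤ n, A's split lists are B's cut tuples
-- turned into compositions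
theorem split_order_eq (n k : Int) (h1 : 1 ≤ k) (h2 : k ≤ n) :
    split_order n k = (pyCombos 1 n (k - 1).toNat).map (partsOf n 0) := by
  rw [split_order, if_pos ⟨by omega, by omega⟩]
  have h := combos_main n (k - 1).toNat 0 (by omega)
  simp only [zero_add, sub_zero] at h
  have hk : k.toNat = (k - 1).toNat + 1 := by omega
  rw [hk]
  exact h.symm

-- A's index-pairing comprehension over range(b) equals B's zip of the even/odd slices
theorem branch_eq (l : List Int) (m' : Nat) (hl : l.length = 2 * m') (b : Int)
    (hb : b = (m' : Int)) :
    (PySem.List.pyRange 0 b 1).map (fun i =>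
        (PySem.List.pyGetD l (2 * i) 0, PySem.List.pyGetD l (2 * i + 1) 0)) =
      List.zip (everyOther l) (everyOther l.tail) := by
  subst hb
  rw [PySem.List.pyRange_one, List.map_map, ← pairing_eq m' l hl]
  have e : ((m' : Int) - 0).toNat = m' := by omega
  rw [e]
  refine List.map_congr_left (fun j hj => ?_)
  show (PySem.List.pyGetD l (2 * (0 + (j : Int))) 0,
        PySem.List.pyGetD l (2 * (0 + (j : Int)) + 1) 0) = _
  rw [show 2 * (0 + (j : Int)) = ((2 * j : Nat) : Int) by push_cast; ring,
      show ((2 * j : Nat) : Int) + 1 = ((2 * j + 1 : Nat) : Int) by push_cast; ring]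
  simp only [PySem.List.pyGetD_natCast]

theorem zip_ne_nil (l : List Int) (m' : Nat) (hl : l.length = 2 * m') (hm : 1 ≤ m') :
    List.zip (everyOther l) (everyOther l.tail) ≠ [] := by
  rw [← pairing_eq m' l hl]
  intro h
  apply_fun List.length at h
  simp at h
  omega

-- ===== VERDICT (by name: the statement is the Claim_ definition above) =====
theorem get_all_possible_adxy_order_seqs_spec : Claim_equal_get_all_possible_adxy_order_seqs := by
  intro n me _
  show get_all_possible_adxy_order_seqs n me = get_all_possible_adxy_order_seqs_alt n me
  rw [get_all_possible_adxy_order_seqs, get_all_possible_adxy_order_seqs_alt]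
  apply PySem.List.foldl_congr_mem
  intro seqs k hk
  rw [PySem.List.mem_pyRange_one] at hk
  rw [split_order_eq n k (by omega) (by omega), List.foldl_map]
  apply PySem.List.foldl_congr_mem
  intro seqs cuts hcuts
  have hclen := combos_length n ((k - 1).toNat) 1 cuts hcuts
  have hplen := partsOf_length n cuts 0
  have hmod2 : k % 2 = 0 ∨ k % 2 = 1 := by omega
  simp only [List.tail_cons, zipWith_diff n cuts 0]
  by_cases hpar : PySem.Int.mod k 2 = 0
  · -- k even
    have hmod : k % 2 = 0 := by
      rw [← PySem.Int.mod_eq_emod_of_pos (by norm_num : (0 : Int) < 2)]; exact hpar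
    have hpar' : ¬ PySem.Int.mod k 2 = 1 := by rw [hpar]; norm_num
    have hl : (partsOf n 0 cuts).length = 2 * (k / 2).toNat := by
      rw [hplen, hclen]; omega
    have hb : PySem.Int.floordiv k 2 = (((k / 2).toNat : Nat) : Int) := by
      rw [PySem.Int.floordiv_eq_ediv_of_pos (by norm_num : (0 : Int) < 2)]; omega
    have hm1 : 1 ≤ (k / 2).toNat := by omega
    rw [if_pos hpar, if_neg hpar']
    rw [branch_eq (partsOf n 0 cuts) ((k / 2).toNat) hl _ hb]
    have hne := zip_ne_nil (partsOf n 0 cuts) ((k / 2).toNat) hl hm1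
    rw [pyGet_neg_one_eq_getLast? _ hne]
    rcases h : (List.zip (everyOther (partsOf n 0 cuts))
        (everyOther (partsOf n 0 cuts).tail)).getLast? with _ | pr
    · exact absurd (List.getLast?_eq_none_iff.mp h) hne
    · rfl
  · -- k odd
    have hmod : k % 2 = 1 := by
      rcases hmod2 with h0 | h1
      · exfalso; apply hpar
        rw [PySem.Int.mod_eq_emod_of_pos (by norm_num : (0 : Int) < 2)]; exact h0
      · exact h1
    have hpar1 : PySem.Int.mod k 2 = 1 := by
      rw [PySem.Int.mod_eq_emod_of_pos (by norm_num : (0 : Int) < 2)]; exact hmod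
    have hl : (0 :: partsOf n 0 cuts).length = 2 * (((k + 1) / 2).toNat) := by
      simp [hplen, hclen]; omega
    have hb : PySem.Int.floordiv (((0 :: partsOf n 0 cuts).length : Nat) : Int) 2
        = ((((k + 1) / 2).toNat : Nat) : Int) := by
      rw [PySem.Int.floordiv_eq_ediv_of_pos (by norm_num : (0 : Int) < 2)]
      have : ((0 :: partsOf n 0 cuts).length : Int) = k + 1 := by
        simp [hplen, hclen]; omega
      rw [this]; omega
    have hm1 : 1 ≤ ((k + 1) / 2).toNat := by omega
    rw [if_neg hpar, if_pos hpar1]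
    rw [branch_eq (0 :: partsOf n 0 cuts) (((k + 1) / 2).toNat) hl _ hb]
    have hne := zip_ne_nil (0 :: partsOf n 0 cuts) (((k + 1) / 2).toNat) hl hm1
    rw [pyGet_neg_one_eq_getLast? _ hne]
    rcases h : (List.zip (everyOther (0 :: partsOf n 0 cuts))
        (everyOther (0 :: partsOf n 0 cuts).tail)).getLast? with _ | pr
    · exact absurd (List.getLast?_eq_none_iff.mp h) hne
    · rfl
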